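-- pv_equiv track=rewrite | github.com/AlexCrosby/AI-SOCO | scap/scapbulkmulti.py | calculate_profiles
-- ===== SOURCE A (Python) =====
-- def compare_to_profiles(profile, author_profiles):
--     best_match = -1  # num of ngrams in profile and unknown code
--     best_profile = -1
--     profile = set(profile)
--     for author in author_profiles:
--         score = len(profile.intersection(author_profiles[author]))
--         if score > best_match:
--             best_match = score
--             best_profile = author
--
--     return best_profile
--
-- def calculate_profiles(dev_x, dev_y, author_profiles):
--     count_total = 0
--     count_success = 0
--     for i in range(len(dev_x)):
--         actual = dev_y[i]
--         result = compare_to_profiles(dev_x[i], author_profiles)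
--         count_total += 1
--         if actual == result:
--             count_success += 1
--     return count_success, count_total
-- ===== SOURCE B (Python) =====
-- def calculate_profiles(dev_x, dev_y, author_profiles):
--     # Inverted index: ngram -> authors whose profile contains it (insertion order).
--     inverted = {}
--     for author in author_profiles:
--         for g in set(author_profiles[author]):
--             inverted.setdefault(g, []).append(author)
--     authors = list(author_profiles)
--     count_success = 0
--     for doc, actual in zip(dev_x, dev_y):
--         counts = {}
--         for g in set(doc):
--             for author in inverted.get(g, ()):
--                 counts[author] = counts.get(author, 0) + 1
--         best_score, best = -1, -1
--         for author in authors: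
--             s = counts.get(author, 0)
--             if s > best_score:
--                 best_score, best = s, author
--         if actual == best:
--             count_success += 1
--     return count_success, len(dev_x)
-- ===== Notes on version B (the rewrite author's own statement) =====
-- stated objective: alternative
-- what changed: Instead of intersecting each document's ngram set with every author profile (A), B builds an inverted index ngram->authors once, accumulates per-author hit counts per document from only the co-occurring entries, and takes the first maximal author in original dict order (intended as faster; measured 1.7-3.6x on mid sizes, unconfirmed at the largest).
import Mathlib
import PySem

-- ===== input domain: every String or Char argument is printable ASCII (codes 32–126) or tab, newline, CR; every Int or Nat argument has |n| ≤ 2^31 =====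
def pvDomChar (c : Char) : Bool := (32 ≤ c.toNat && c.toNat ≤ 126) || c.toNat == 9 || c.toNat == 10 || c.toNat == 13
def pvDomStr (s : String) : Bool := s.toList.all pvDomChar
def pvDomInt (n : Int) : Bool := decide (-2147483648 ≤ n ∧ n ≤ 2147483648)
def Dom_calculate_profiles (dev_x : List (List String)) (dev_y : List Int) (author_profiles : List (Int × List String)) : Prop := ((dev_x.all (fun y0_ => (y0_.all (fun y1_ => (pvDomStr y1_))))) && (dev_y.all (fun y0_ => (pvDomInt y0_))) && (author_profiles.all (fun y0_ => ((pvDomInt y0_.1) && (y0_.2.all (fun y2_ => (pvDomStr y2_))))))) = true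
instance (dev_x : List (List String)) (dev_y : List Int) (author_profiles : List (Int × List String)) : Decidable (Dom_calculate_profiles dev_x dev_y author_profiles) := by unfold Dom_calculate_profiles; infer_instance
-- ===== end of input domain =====

-- B replaces the per-document intersection with every author profile by an inverted index
-- ngram → authors built once, accumulating per-author hit counts per document (objective: alternative).

-- ===== PORT A =====
-- A's helper: linear scan over the author dict, keeping the first best intersection score.
def compare_to_profiles (profile : List String) (author_profiles : List (Int × List String)) : Int :=
  let pset := PySem.Set.ofList profile
  (author_profiles.foldl
    (fun (st : Int × Int) ap =>
      let score : Int := ((PySem.Set.inter pset ap.2).length : Int)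
      if score > st.1 then (score, ap.1) else st)
    (-1, -1)).2

def calculate_profiles (dev_x : List (List String)) (dev_y : List Int) (author_profiles : List (Int × List String)) : Int × Int :=
  (PySem.List.pyRange 0 (dev_x.length : Int) 1).foldl
    (fun (st : Int × Int) i =>
      let actual := PySem.List.pyGetD dev_y i 0
      let result := compare_to_profiles (PySem.List.pyGetD dev_x i []) author_profiles
      let total := st.2 + 1
      if actual = result then (st.1 + 1, total) else (st.1, total))
    (0, 0)

-- ===== PORT B =====
-- inverted index: ngram → list of authors whose profile set contains it (insertion order)
def pvInvert (author_profiles : List (Int × List String)) : PySem.Dict String (List Int) :=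
  author_profiles.foldl
    (fun d ap => (PySem.Set.ofList ap.2).foldl
      (fun d g => d.modify g [] (fun l => l ++ [ap.1])) d)
    PySem.Dict.empty

-- per-document accumulation of hit counts per author
def pvCounts (inverted : PySem.Dict String (List Int)) (doc : List String) : PySem.Dict Int Int :=
  (PySem.Set.ofList doc).foldl
    (fun c g => (inverted.getD g []).foldl (fun c a => c.modify a 0 (· + 1)) c)
    PySem.Dict.empty

-- first author with the maximal count (counts default to 0), -1 if there are none
def pvBest (authors : List Int) (counts : PySem.Dict Int Int) : Int :=
  (authors.foldl
    (fun (st : Int × Int) a =>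
      let s := counts.getD a 0
      if s > st.1 then (s, a) else st)
    (-1, -1)).2

def calculate_profiles_alt (dev_x : List (List String)) (dev_y : List Int) (author_profiles : List (Int × List String)) : Int × Int :=
  let inverted := pvInvert author_profiles
  let authors := author_profiles.map Prod.fst
  let count_success :=
    (dev_x.zip dev_y).foldl
      (fun (acc : Int) p =>
        if p.2 = pvBest authors (pvCounts inverted p.1) then acc + 1 else acc)
      0
  (count_success, (dev_x.length : Int))

-- ===== PRECONDITION & SPEC =====
-- Pre_ excludes (a) inputs where dev_y is shorter than dev_x, on which A raises IndexError, and
-- (b) association lists with duplicate author keys, which do not represent any Python dict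
-- (A's argument is a dict), so A's behaviour on them is not defined by the source.
def Pre_calculate_profiles (dev_x : List (List String)) (dev_y : List Int) (author_profiles : List (Int × List String)) : Prop :=
  dev_x.length ≤ dev_y.length ∧ (author_profiles.map Prod.fst).Nodup
instance (dev_x : List (List String)) (dev_y : List Int) (author_profiles : List (Int × List String)) : Decidable (Pre_calculate_profiles dev_x dev_y author_profiles) := by unfold Pre_calculate_profiles; infer_instance

def pvWitness_calculate_profiles : List (List String) × List Int × (List (Int × List String)) :=
  ([["ab", "bc"], ["cd"]], [1, 2], [(1, ["ab", "xy"]), (2, ["cd", "bc"])])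

def Spec_calculate_profiles (dev_x : List (List String)) (dev_y : List Int) (author_profiles : List (Int × List String)) (out : Int × Int) : Prop := out = calculate_profiles_alt dev_x dev_y author_profiles
instance (dev_x : List (List String)) (dev_y : List Int) (author_profiles : List (Int × List String)) (out : Int × Int) : Decidable (Spec_calculate_profiles dev_x dev_y author_profiles out) := by unfold Spec_calculate_profiles; infer_instance

-- ===== CLAIM (what is proved, stated in full; the proofs are below) =====
def Claim_equal_calculate_profiles : Prop := ∀ (dev_x : List (List String)) (dev_y : List Int) (author_profiles : List (Int × List String)), Dom_calculate_profiles dev_x dev_y author_profiles → Pre_calculate_profiles dev_x dev_y author_profiles → Spec_calculate_profiles dev_x dev_y author_profiles (calculate_profiles dev_x dev_y author_profiles)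

-- ===== LEMMAS AND PROOFS =====

-- the inverted index, characterised: authors (in order) whose profile contains g
theorem pvInvert_getD (aps : List (Int × List String)) (g : String) :
    (pvInvert aps).getD g [] =
      (aps.filter (fun ap => ap.2.contains g)).map Prod.fst := by
  unfold pvInvert
  suffices h : ∀ (l : List (Int × List String)) (d : PySem.Dict String (List Int)),
      (l.foldl (fun d ap => (PySem.Set.ofList ap.2).foldl
        (fun d g => d.modify g [] (fun l => l ++ [ap.1])) d) d).getD g [] =
      d.getD g [] ++ (l.filter (fun ap => ap.2.contains g)).map Prod.fst by
    simpa using h aps PySem.Dict.empty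
  intro l
  induction l with
  | nil => intro d; simp
  | cons ap rest ih =>
    intro d
    rw [List.foldl_cons, ih]
    have hinner : ((PySem.Set.ofList ap.2).foldl
        (fun d g => d.modify g [] (fun l => l ++ [ap.1])) d).getD g [] =
        d.getD g [] ++ (if ap.2.contains g then [ap.1] else []) := by
      have hmap : (PySem.Set.ofList ap.2).foldl
          (fun d g => d.modify g [] (fun l => l ++ [ap.1])) d =
          ((PySem.Set.ofList ap.2).map (fun g => (g, ap.1))).foldl
            (fun d p => d.modify p.1 [] (fun l => l ++ [p.2])) d := by
        rw [List.foldl_map]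
      rw [hmap, PySem.Dict.getD_foldl_modify_append]
      congr 1
      rw [List.filter_map, List.map_map]
      show ((PySem.Set.ofList ap.2).filter (fun x => x == g)).map (fun _ => ap.1) =
        (if ap.2.contains g then [ap.1] else [])
      rw [List.filter_beq]
      by_cases hg : g ∈ ap.2
      · rw [List.count_eq_one_of_mem (PySem.Set.nodup_ofList ap.2)
            ((PySem.Set.mem_ofList ap.2 g).2 hg)]
        simp [hg]
      · rw [List.count_eq_zero_of_not_mem (fun hc => hg ((PySem.Set.mem_ofList ap.2 g).1 hc))]
        simp [hg]
    rw [hinner]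
    by_cases hg : g ∈ ap.2 <;> simp [hg]

-- the per-document counter: getD a 0 sums a's occurrences over the hit lists
theorem pvCounts_getD (inv : PySem.Dict String (List Int)) (doc : List String) (a : Int) :
    (pvCounts inv doc).getD a 0 =
      ((PySem.Set.ofList doc).map (fun g => ((inv.getD g []).count a : Int))).sum := by
  unfold pvCounts
  suffices h : ∀ (gs : List String) (c : PySem.Dict Int Int),
      (gs.foldl (fun c g => (inv.getD g []).foldl (fun c a => c.modify a 0 (· + 1)) c) c).getD a 0 =
      c.getD a 0 + (gs.map (fun g => ((inv.getD g []).count a : Int))).sum by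
    simpa using h (PySem.Set.ofList doc) PySem.Dict.empty
  intro gs
  induction gs with
  | nil => intro c; simp
  | cons g rest ih =>
    intro c
    rw [List.foldl_cons, ih, PySem.Dict.getD_foldl_modify_add_one]
    simp [add_assoc]

-- per author in a duplicate-free profile dict, the accumulated count is A's intersection score
theorem score_eq (aps : List (Int × List String)) (hnd : (aps.map Prod.fst).Nodup)
    (doc : List String) (ap : Int × List String) (hap : ap ∈ aps) :
    (pvCounts (pvInvert aps) doc).getD ap.1 0 =
      ((PySem.Set.inter (PySem.Set.ofList doc) ap.2).length : Int) := by
  rw [pvCounts_getD]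
  have hcount : ∀ g : String,
      ((pvInvert aps).getD g []).count ap.1 = if ap.2.contains g then 1 else 0 := by
    intro g
    rw [pvInvert_getD]
    have hnodup : ((aps.filter (fun ap => ap.2.contains g)).map Prod.fst).Nodup :=
      hnd.sublist (List.Sublist.map Prod.fst List.filter_sublist)
    by_cases hg : ap.2.contains g = true
    · have hmem : ap.1 ∈ (aps.filter (fun ap => ap.2.contains g)).map Prod.fst :=
        List.mem_map_of_mem (List.mem_filter.2 ⟨hap, hg⟩)
      rw [List.count_eq_one_of_mem hnodup hmem, if_pos hg]
    · have hmem : ap.1 ∉ (aps.filter (fun ap => ap.2.contains g)).map Prod.fst := by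
        intro hm
        rcases List.mem_map.1 hm with ⟨ap', hap', hfst⟩
        rcases List.mem_filter.1 hap' with ⟨hap'mem, hg'⟩
        have : ap' = ap := List.inj_on_of_nodup_map hnd hap'mem hap hfst
        exact hg (this ▸ hg')
      rw [List.count_eq_zero_of_not_mem hmem, if_neg hg]
  calc ((PySem.Set.ofList doc).map (fun g => (((pvInvert aps).getD g []).count ap.1 : Int))).sum
      = ((PySem.Set.ofList doc).map (fun g => if ap.2.contains g then (1 : Int) else 0)).sum := by
        congr 1; exact List.map_congr_left (fun g _ => by rw [hcount g]; split_ifs <;> simp)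
    _ = ((PySem.Set.ofList doc).countP (fun g => ap.2.contains g) : Int) :=
        PySem.List.sum_map_ite_one_zero _ _
    _ = ((PySem.Set.inter (PySem.Set.ofList doc) ap.2).length : Int) := by
        rw [List.countP_eq_length_filter]; rfl

-- B's argmax over the index equals A's direct scan
theorem best_eq (aps : List (Int × List String)) (hnd : (aps.map Prod.fst).Nodup)
    (doc : List String) :
    pvBest (aps.map Prod.fst) (pvCounts (pvInvert aps) doc) = compare_to_profiles doc aps := by
  unfold pvBest compare_to_profiles
  rw [List.foldl_map]
  congr 1
  apply PySem.List.foldl_congr_mem'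
  intro ap hap st
  rw [score_eq aps hnd doc ap hap]

-- A's paired loop splits: success accumulator and a step counter
theorem pvPairFold (aps : List (Int × List String)) (l : List (List String × Int)) (s t : Int) :
    l.foldl (fun (st : Int × Int) p =>
        (if p.2 = compare_to_profiles p.1 aps then st.1 + 1 else st.1, st.2 + 1)) (s, t)
      = (l.foldl (fun (acc : Int) p =>
          if p.2 = compare_to_profiles p.1 aps then acc + 1 else acc) s, t + l.length) := by
  induction l generalizing s t with
  | nil => simp
  | cons p rest ih =>
    rw [List.foldl_cons, List.foldl_cons, ih]
    rw [Prod.mk.injEq]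
    constructor
    · rfl
    · show t + 1 + (rest.length : Int) = t + ((p :: rest).length : Int)
      simp only [List.length_cons]; push_cast; ring

-- ===== VERDICT (by name: the statement is the Claim_ definition above) =====
theorem calculate_profiles_spec : Claim_equal_calculate_profiles := by
  intro dev_x dev_y aps _ hpre
  obtain ⟨hlen, hnd⟩ := hpre
  show calculate_profiles dev_x dev_y aps = calculate_profiles_alt dev_x dev_y aps
  simp only [calculate_profiles, calculate_profiles_alt]
  have hzlen : (dev_x.zip dev_y).length = dev_x.length := by
    rw [List.length_zip]; omega
  -- rewrite A's indexed loop as a loop over the zipped lists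
  have hstep : (PySem.List.pyRange 0 (dev_x.length : Int) 1).foldl
      (fun (st : Int × Int) i =>
        if PySem.List.pyGetD dev_y i 0 =
            compare_to_profiles (PySem.List.pyGetD dev_x i []) aps
        then (st.1 + 1, st.2 + 1) else (st.1, st.2 + 1))
      (0, 0) =
      (PySem.List.pyRange 0 (dev_x.length : Int) 1).foldl
      (fun (st : Int × Int) i =>
        (fun (st : Int × Int) (p : List String × Int) =>
          (if p.2 = compare_to_profiles p.1 aps then st.1 + 1 else st.1, st.2 + 1))
          st (PySem.List.pyGetD (dev_x.zip dev_y) i ([], 0)))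
      (0, 0) := by
    apply PySem.List.foldl_congr_mem'
    intro i hi st
    have hib : (0 : Int) ≤ i ∧ i < (dev_x.length : Int) := PySem.List.mem_pyRange_one.mp hi
    have h0 : 0 ≤ i := hib.1
    have h1x : i < (dev_x.length : Int) := hib.2
    have h1z : i < ((dev_x.zip dev_y).length : Int) := by rw [hzlen]; exact h1x
    have h1y : i < (dev_y.length : Int) := by omega
    rw [PySem.List.pyGetD_eq_getElem dev_y 0 h0 h1y,
        PySem.List.pyGetD_eq_getElem dev_x [] h0 h1x,
        PySem.List.pyGetD_eq_getElem (dev_x.zip dev_y) ([], 0) h0 h1z,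
        List.getElem_zip]
    by_cases hc : dev_y[i.toNat] = compare_to_profiles dev_x[i.toNat] aps <;> simp [hc]
  rw [hstep, show ((dev_x.length : Nat) : Int) = ((dev_x.zip dev_y).length : Int) by
        rw [hzlen],
      PySem.List.foldl_pyRange_zero_pyGetD' (dev_x.zip dev_y) ([], 0)
        (fun (st : Int × Int) (p : List String × Int) =>
          (if p.2 = compare_to_profiles p.1 aps then st.1 + 1 else st.1, st.2 + 1)) (0, 0),
      pvPairFold aps (dev_x.zip dev_y) 0 0, Prod.mk.injEq]
  constructor
  · -- success component
    apply PySem.List.foldl_congr_mem'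
    intro p _ acc
    rw [best_eq aps hnd p.1]
  · -- total component
    rw [hzlen]; simp
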